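-- pv_equiv track=rewrite | github.com/giltom/crypt | encodings.py | pad_base64
-- ===== SOURCE A (Python) =====
-- def pad_base64(s, start=0):
--     res = 'A'*start + s
--     declen = len(res)*6
--     pad = ''
--     while (declen + 6*len(pad)) % 8 != 0:
--         pad += 'A'
--     if len(pad) == 1:
--         pad = '='
--     elif len(pad) >= 2:
--         pad = pad[:-2] + '=='
--     return res + pad
-- ===== SOURCE B (Python) =====
-- def pad_base64(s, start=0):
--     res = 'A'*start + s
--     p = -len(res) % 4
--     return res + ['', '=', '==', 'A=='][p]
-- ===== Notes on version B (the rewrite author's own statement) =====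
-- stated objective: simpler
-- what changed: Replaces the while loop that grows the pad one 'A' at a time (and the branchy rewrite of the pad) with a closed-form pad count p = (-len(res)) % 4 and a constant four-entry lookup table.
import Mathlib
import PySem

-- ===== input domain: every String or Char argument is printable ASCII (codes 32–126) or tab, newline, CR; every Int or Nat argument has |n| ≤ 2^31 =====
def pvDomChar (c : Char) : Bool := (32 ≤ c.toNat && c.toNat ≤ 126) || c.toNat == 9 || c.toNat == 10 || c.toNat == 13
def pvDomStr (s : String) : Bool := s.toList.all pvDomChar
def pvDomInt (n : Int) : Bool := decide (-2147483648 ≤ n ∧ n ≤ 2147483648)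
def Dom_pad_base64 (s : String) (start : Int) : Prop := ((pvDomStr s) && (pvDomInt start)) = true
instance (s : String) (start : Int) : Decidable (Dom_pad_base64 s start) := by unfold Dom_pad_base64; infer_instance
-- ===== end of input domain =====

-- B replaces A's grow-one-'A'-at-a-time while loop and pad rewrite with a closed-form
-- pad count (-len) % 4 and a four-entry lookup table (objective: simpler).

-- ===== PORT A =====
-- A's while loop: keep appending 'A' while (declen + 6*len(pad)) % 8 != 0.
-- The loop terminates within 4 iterations (len(pad)+len(res) mod 4 cycles); fuel 4 only
-- makes the same computation total and never changes the result.
def padLoopA (declen : Nat) : Nat → List Char → List Char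
  | 0, pad => pad
  | fuel + 1, pad =>
      if (declen + 6 * pad.length) % 8 ≠ 0 then padLoopA declen fuel (pad ++ ['A'])
      else pad

def pad_base64 (s : String) (start : Int) : String :=
  let res := PySem.List.pyRepeat ['A'] start ++ s.toList
  let declen := res.length * 6
  let pad := padLoopA declen 4 []
  let pad :=
    if pad.length = 1 then ['=']
    else if 2 ≤ pad.length then PySem.List.slice pad none (some (-2)) ++ ['=', '=']
    else pad
  String.ofList (res ++ pad)

-- ===== PORT B =====
def pad_base64_alt (s : String) (start : Int) : String :=
  let res := PySem.List.pyRepeat ['A'] start ++ s.toList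
  let p := PySem.Int.mod (-(res.length : Int)) 4
  let table : List (List Char) := [[], ['='], ['=', '='], ['A', '=', '=']]
  String.ofList (res ++ (PySem.List.pyGet? table p).getD [])

-- ===== PRECONDITION & SPEC =====
def Spec_pad_base64 (s : String) (start : Int) (out : String) : Prop := out = pad_base64_alt s start
instance (s : String) (start : Int) (out : String) : Decidable (Spec_pad_base64 s start out) := by unfold Spec_pad_base64; infer_instance

-- ===== CLAIM (what is proved, stated in full; the proofs are below) =====
def Claim_equal_pad_base64 : Prop := ∀ (s : String) (start : Int), Dom_pad_base64 s start → Spec_pad_base64 s start (pad_base64 s start)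

-- ===== LEMMAS AND PROOFS =====

-- Both tails depend only on n = res.length; compare them pointwise on n % 4.
theorem tails_eq (n : Nat) :
    (let pad := padLoopA (n * 6) 4 []
     if pad.length = 1 then ['=']
     else if 2 ≤ pad.length then PySem.List.slice pad none (some (-2)) ++ ['=', '=']
     else pad)
    = ((PySem.List.pyGet? ([[], ['='], ['=', '='], ['A', '=', '=']] : List (List Char))
        (PySem.Int.mod (-(n : Int)) 4)).getD []) := by
  obtain ⟨k, r, hr, hn⟩ : ∃ k r, r < 4 ∧ n = 4 * k + r := ⟨n / 4, n % 4, Nat.mod_lt _ (by omega), by omega⟩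
  have hmod : PySem.Int.mod (-(n : Int)) 4 = ((4 - r) % 4 : Nat) := by
    have h4 : (0:Int) < 4 := by norm_num
    rw [PySem.Int.mod_eq_emod_of_pos h4]
    subst hn
    omega
  subst hn
  interval_cases r <;> simp only [hmod]
  · have c0 : 4 * k * 6 % 8 = 0 := by omega
    norm_num [padLoopA, c0, PySem.List.slice, PySem.List.pyGet?, PySem.List.pyIdx?]
  · have c1 : (4 * k + 1) * 6 % 8 = 6 := by omega
    have c2 : ((4 * k + 1) * 6 + 6) % 8 = 4 := by omega
    have c3 : ((4 * k + 1) * 6 + 12) % 8 = 2 := by omega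
    have c4 : ((4 * k + 1) * 6 + 18) % 8 = 0 := by omega
    norm_num [padLoopA, c1, c2, c3, c4, PySem.List.slice, PySem.List.pyGet?, PySem.List.pyIdx?]
    decide
  · have c1 : (4 * k + 2) * 6 % 8 = 4 := by omega
    have c2 : ((4 * k + 2) * 6 + 6) % 8 = 2 := by omega
    have c3 : ((4 * k + 2) * 6 + 12) % 8 = 0 := by omega
    norm_num [padLoopA, c1, c2, c3, PySem.List.slice, PySem.List.pyGet?, PySem.List.pyIdx?]
    decide
  · have c1 : (4 * k + 3) * 6 % 8 = 2 := by omega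
    have c2 : ((4 * k + 3) * 6 + 6) % 8 = 0 := by omega
    norm_num [padLoopA, c1, c2, PySem.List.slice, PySem.List.pyGet?, PySem.List.pyIdx?]

-- ===== VERDICT (by name: the statement is the Claim_ definition above) =====
theorem pad_base64_spec : Claim_equal_pad_base64 := by
  intro s start _
  unfold Spec_pad_base64 pad_base64 pad_base64_alt
  simp only
  rw [tails_eq]
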